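-- pv_equiv track=rewrite | github.com/gherson/Exemplar | exemplar.py | remove_examples_loop
-- ===== SOURCE A (Python) =====
-- from typing import List, Tuple, Dict, Any
--
-- def remove_examples_loop(code_list: List[str]) -> List[str]:
--     """
--     Exemplar creates a temporary __example__ loop so that it can be solved like a regular FOR loop. This function
--     removes it once it is no longer needed.
--     Specifically, copy lines to output until "for __example__ in [, " reached (FOR_found=True), then dedent.
--     :param code_list: python code
--     :return: python code without the __example__ loop top.
--     """
--     code_list_out = []
--     FOR_found = False
--     for line in code_list:
--         if not line:
--             continue  # Remove blank lines.
--         if not FOR_found and line.strip()[:20] == "for __example__ in [":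
--             FOR_found = True
--         elif FOR_found:
--             code_list_out.append(line[4:])  # Dedent
--         else:
--             code_list_out.append(line)
--     assert FOR_found, "Error: remove_examples_loop() never found __example__ loop"
--     return code_list_out
-- ===== SOURCE B (Python) =====
-- def remove_examples_loop(code_list):
--     idx = next((i for i, l in enumerate(code_list)
--                 if l.strip()[:20] == "for __example__ in ["), None)
--     assert idx is not None, "Error: remove_examples_loop() never found __example__ loop"
--     return [l for l in code_list[:idx] if l] + \
--            [l[4:] for l in code_list[idx + 1:] if l]
-- ===== Notes on version B (the rewrite author's own statement) =====
-- stated objective: simpler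
-- what changed: B locates the FOR line's index once, then builds the result as two comprehensions (head copied, tail dedented), replacing A's flag-driven state machine loop.
import Mathlib
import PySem

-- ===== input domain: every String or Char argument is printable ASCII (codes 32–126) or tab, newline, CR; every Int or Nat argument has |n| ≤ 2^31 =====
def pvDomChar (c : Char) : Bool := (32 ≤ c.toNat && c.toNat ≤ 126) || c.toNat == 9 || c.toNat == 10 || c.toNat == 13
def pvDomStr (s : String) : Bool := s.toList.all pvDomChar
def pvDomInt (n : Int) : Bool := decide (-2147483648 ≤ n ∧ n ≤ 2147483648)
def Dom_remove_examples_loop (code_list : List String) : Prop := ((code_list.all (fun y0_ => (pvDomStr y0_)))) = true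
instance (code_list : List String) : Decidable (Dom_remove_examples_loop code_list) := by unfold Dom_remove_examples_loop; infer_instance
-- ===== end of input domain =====

-- B replaces A's flag-driven state machine by locating the FOR line's index once and
-- building the result as two comprehension-style passes (objective: simpler).
-- Pre_ excludes inputs with no __example__ FOR line, on which both Pythons raise AssertionError.

-- shared helper: `line.strip()[:20] == "for __example__ in ["` (slice [:20] = take 20, exact)
def pvIsForLine (l : String) : Bool :=
  (PySem.Str.strip l).toList.take 20 == "for __example__ in [".toList

-- `line[4:]` (nonnegative slice = drop 4, exact)
def pvDedent (l : String) : String := String.ofList (l.toList.drop 4)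

-- ===== PORT A =====
-- loop body of A: state = (code_list_out, FOR_found)
def pvStepA (st : List String × Bool) (line : String) : List String × Bool :=
  if line = "" then st                   -- `if not line: continue`
  else if !st.2 && pvIsForLine line then (st.1, true)
  else if st.2 then (st.1 ++ [pvDedent line], st.2)
  else (st.1 ++ [line], st.2)

def remove_examples_loop (code_list : List String) : List String :=
  (code_list.foldl pvStepA ([], false)).1
  -- the final `assert FOR_found` raises exactly when Pre_ fails; value unclaimed there

-- ===== PORT B =====
def remove_examples_loop_alt (code_list : List String) : List String :=
  match code_list.findIdx? pvIsForLine with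
  | none => []          -- assert fails (outside Pre_)
  | some idx =>
      ((code_list.take idx).filter (fun l => l ≠ "")) ++
      (((code_list.drop (idx + 1)).filter (fun l => l ≠ "")).map pvDedent)

-- ===== PRECONDITION & SPEC =====
-- Pre_: some line matches the __example__ FOR header; otherwise both A and B raise AssertionError.
def Pre_remove_examples_loop (code_list : List String) : Prop :=
  code_list.any pvIsForLine = true
instance (code_list : List String) : Decidable (Pre_remove_examples_loop code_list) := by
  unfold Pre_remove_examples_loop; infer_instance

def pvWitness_remove_examples_loop : List String :=
  ["x = 1", "for __example__ in [1, 2]:", "    y = __example__", "", "    z = y"]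

def Spec_remove_examples_loop (code_list : List String) (out : List String) : Prop := out = remove_examples_loop_alt code_list
instance (code_list : List String) (out : List String) : Decidable (Spec_remove_examples_loop code_list out) := by unfold Spec_remove_examples_loop; infer_instance

-- ===== CLAIM (what is proved, stated in full; the proofs are below) =====
def Claim_equal_remove_examples_loop : Prop := ∀ (code_list : List String), Dom_remove_examples_loop code_list → Pre_remove_examples_loop code_list → Spec_remove_examples_loop code_list (remove_examples_loop code_list)

-- ===== LEMMAS AND PROOFS =====

-- a matching line is never blank
theorem pvIsForLine_ne_empty {l : String} (h : pvIsForLine l = true) : l ≠ "" := by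
  rintro rfl; exact absurd h (by decide)

-- after FOR_found, A filters blanks and dedents
theorem foldA_true (l : List String) (acc : List String) :
    (l.foldl pvStepA (acc, true)).1 = acc ++ (l.filter (fun s => s ≠ "")).map pvDedent := by
  induction l generalizing acc with
  | nil => simp
  | cons h t ih =>
    by_cases hb : h = ""
    · subst hb; simpa [pvStepA] using ih acc
    · simp [pvStepA, hb, ih]

theorem main_lemma (l : List String) (acc : List String)
    (hp : l.any pvIsForLine = true) :
    (l.foldl pvStepA (acc, false)).1 = acc ++ remove_examples_loop_alt l := by
  induction l generalizing acc with
  | nil => simp at hp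
  | cons h t ih =>
    by_cases hf : pvIsForLine h = true
    · have hne := pvIsForLine_ne_empty hf
      simp only [List.foldl_cons, pvStepA, if_neg hne, hf, Bool.not_false, Bool.true_and,
        remove_examples_loop_alt, List.findIdx?_cons]
      simpa using foldA_true t acc
    · have hf' : pvIsForLine h = false := by simpa using hf
      have hpt : t.any pvIsForLine = true := by
        simp [List.any_cons, hf'] at hp; simpa using hp
      obtain ⟨i, hi⟩ : ∃ i, t.findIdx? pvIsForLine = some i := by
        cases hfi : t.findIdx? pvIsForLine with
        | some i => exact ⟨i, rfl⟩
        | none =>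
          exfalso
          have := List.findIdx?_eq_none_iff.mp hfi
          obtain ⟨x, hx, hpx⟩ := List.any_eq_true.mp hpt
          exact absurd (this x hx) (by simp [hpx])
      have halt : remove_examples_loop_alt (h :: t) =
          (if h = "" then [] else [h]) ++ remove_examples_loop_alt t := by
        by_cases hb : h = ""
        · subst hb; simp [remove_examples_loop_alt, List.findIdx?_cons, hf', hi]
        · simp [remove_examples_loop_alt, List.findIdx?_cons, hf', hi, hb]
      by_cases hb : h = ""
      · subst hb
        simp only [List.foldl_cons]
        rw [show pvStepA (acc, false) "" = (acc, false) from by simp [pvStepA],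
          ih acc hpt, halt]
        simp
      · simp only [List.foldl_cons]
        rw [show pvStepA (acc, false) h = (acc ++ [h], false) from by simp [pvStepA, hb, hf'],
          ih (acc ++ [h]) hpt, halt]
        simp [hb]

-- ===== VERDICT (by name: the statement is the Claim_ definition above) =====
theorem remove_examples_loop_spec : Claim_equal_remove_examples_loop := by
  intro code_list _ hpre
  unfold Spec_remove_examples_loop remove_examples_loop
  simpa using main_lemma code_list [] hpre
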